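-- pv_equiv track=rewrite | github.com/madfp/RunnerGeeks-Exercises | Dv2.py | calcular_pesos
-- ===== SOURCE A (Python) =====
-- def calcular_pesos(chess_board: list[list[int]], casilla_actual: list[int]):
--     # Creamos una matriz con todos los movimientos posibles del caballero
--     movimientos = [[2, 1], [2, -1], [1, 2], [1, -2],
--                    [-1, 2], [-1, -2], [-2, 1], [-2, -1]]
--     pesos = []
--     movimientos_finales = []
--
--     for movimiento in movimientos:
--         cont = 1
--         mov_x = casilla_actual[0]+movimiento[0]
--         mov_y = casilla_actual[1]+movimiento[1]
--         # Si el movimiento sale del tablero su peso es 0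
--         # En caso contrario se procede a calcular su peso
--         if mov_x not in range(0, 8) or mov_y not in range(0, 8):
--             pesos.append(0)
--         else:
--             actual = [mov_x, mov_y]
--             # Los movimientos pasan a ser los valores actuales para la evaluacion
--             # Creamos la nueva iteracion para calcular los pesos
--             for nuevo_movimiento in movimientos:
--                 new_mov_x = actual[0] + nuevo_movimiento[0]
--                 new_mov_y = actual[1] + nuevo_movimiento[1]
--                 if new_mov_x in range(0, 8) and new_mov_y in range(0, 8) and chess_board[new_mov_x][new_mov_y] == 0:
--                     cont += 1
--             pesos.append(cont)
--
--     for k in range(1, 8):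
--         for j in range(len(pesos)):
--             if pesos[j] == k:
--                 movimientos_finales.append(movimientos[j])
--     return movimientos_finales
-- ===== SOURCE B (Python) =====
-- def calcular_pesos(chess_board: list[list[int]], casilla_actual: list[int]):
--     movimientos = [[2, 1], [2, -1], [1, 2], [1, -2],
--                    [-1, 2], [-1, -2], [-2, 1], [-2, -1]]
--
--     def peso(mov):
--         x = casilla_actual[0] + mov[0]
--         y = casilla_actual[1] + mov[1]
--         if not (0 <= x < 8 and 0 <= y < 8):
--             return 0
--         return 1 + sum(1 for dx, dy in movimientos
--                        if 0 <= x + dx < 8 and 0 <= y + dy < 8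
--                        and chess_board[x + dx][y + dy] == 0)
--
--     pares = [(peso(m), m) for m in movimientos]
--     return [m for p, m in sorted((pm for pm in pares if 1 <= pm[0] <= 7),
--                                  key=lambda pm: pm[0])]
-- ===== Notes on version B (the rewrite author's own statement) =====
-- stated objective: simpler
-- what changed: A orders the moves by scanning the weight list once per candidate weight k=1..7 (a 7-pass bucket scan with index arithmetic over two parallel lists); B builds (weight, move) pairs once with a comprehension, filters to weights 1..7 and produces the order with a single stable sort by weight.
import Mathlib
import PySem

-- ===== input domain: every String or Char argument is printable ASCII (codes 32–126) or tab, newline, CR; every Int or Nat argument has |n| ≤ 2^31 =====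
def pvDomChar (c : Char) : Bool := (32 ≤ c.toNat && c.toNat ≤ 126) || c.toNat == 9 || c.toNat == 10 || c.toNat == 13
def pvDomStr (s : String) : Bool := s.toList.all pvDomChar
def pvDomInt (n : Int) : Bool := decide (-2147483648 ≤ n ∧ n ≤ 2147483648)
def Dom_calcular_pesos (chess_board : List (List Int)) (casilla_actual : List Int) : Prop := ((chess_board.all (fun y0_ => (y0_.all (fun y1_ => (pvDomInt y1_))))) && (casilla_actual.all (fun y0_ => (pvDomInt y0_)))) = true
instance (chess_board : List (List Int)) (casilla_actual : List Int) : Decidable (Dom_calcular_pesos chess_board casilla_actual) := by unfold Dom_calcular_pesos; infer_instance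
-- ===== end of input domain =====

-- B replaces A's 7-pass bucket scan over the weight list by building (weight, move)
-- pairs once, filtering to weights 1..7 and doing ONE stable sort by weight (objective:
-- simpler / idiomatic; same asymptotic cost on the fixed 8 moves).

-- the fixed table of knight moves (a shared literal constant of the Python module)
def pvMovs : List (List Int) := [[2, 1], [2, -1], [1, 2], [1, -2], [-1, 2], [-1, -2], [-2, 1], [-2, -1]]

-- ===== PORT A =====
def calcular_pesos (chess_board : List (List Int)) (casilla_actual : List Int) : List (List Int) :=
  let movimientos := pvMovs
  -- first loop: for movimiento in movimientos: … pesos.append(…)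
  let pesos : List Int := movimientos.foldl (fun pesos movimiento =>
    let mov_x := PySem.List.pyGetD casilla_actual 0 0 + PySem.List.pyGetD movimiento 0 0
    let mov_y := PySem.List.pyGetD casilla_actual 1 0 + PySem.List.pyGetD movimiento 1 0
    if ¬(0 ≤ mov_x ∧ mov_x < 8) ∨ ¬(0 ≤ mov_y ∧ mov_y < 8) then
      pesos ++ [0]
    else
      -- inner loop: for nuevo_movimiento in movimientos: cont += 1 when on-board & empty
      let cont : Int := movimientos.foldl (fun cont nuevo_movimiento =>
        let new_mov_x := mov_x + PySem.List.pyGetD nuevo_movimiento 0 0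
        let new_mov_y := mov_y + PySem.List.pyGetD nuevo_movimiento 1 0
        if (0 ≤ new_mov_x ∧ new_mov_x < 8) ∧ (0 ≤ new_mov_y ∧ new_mov_y < 8) ∧
            PySem.List.pyGetD (PySem.List.pyGetD chess_board new_mov_x []) new_mov_y 0 = 0 then
          cont + 1
        else cont) 1
      pesos ++ [cont]) []
  -- for k in range(1, 8): for j in range(len(pesos)): if pesos[j] == k: append movimientos[j]
  (PySem.List.pyRange 1 8 1).foldl (fun movimientos_finales k =>
    (PySem.List.pyRange 0 (PySem.List.len pesos) 1).foldl (fun movimientos_finales j =>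
      if PySem.List.pyGetD pesos j 0 = k then
        movimientos_finales ++ [PySem.List.pyGetD movimientos j []]
      else movimientos_finales) movimientos_finales) []

-- ===== PORT B =====
-- def peso(mov): Warnsdorff weight of one move (0 if it leaves the board, else 1 + a 0/1-sum)
-- def peso(mov): Warnsdorff weight of one move (0 if it leaves the board, else 1 + a 0/1-sum);
-- the temporaries x, y of Source B are written inline here (same values)
def pvPeso (chess_board : List (List Int)) (casilla_actual : List Int) (mov : List Int) : Int :=
  if ¬((0 ≤ PySem.List.pyGetD casilla_actual 0 0 + PySem.List.pyGetD mov 0 0 ∧ PySem.List.pyGetD casilla_actual 0 0 + PySem.List.pyGetD mov 0 0 < 8) ∧ (0 ≤ PySem.List.pyGetD casilla_actual 1 0 + PySem.List.pyGetD mov 1 0 ∧ PySem.List.pyGetD casilla_actual 1 0 + PySem.List.pyGetD mov 1 0 < 8)) then 0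
  else
    1 + (pvMovs.map (fun nm =>
      if (0 ≤ (PySem.List.pyGetD casilla_actual 0 0 + PySem.List.pyGetD mov 0 0) + PySem.List.pyGetD nm 0 0 ∧ (PySem.List.pyGetD casilla_actual 0 0 + PySem.List.pyGetD mov 0 0) + PySem.List.pyGetD nm 0 0 < 8) ∧
          (0 ≤ (PySem.List.pyGetD casilla_actual 1 0 + PySem.List.pyGetD mov 1 0) + PySem.List.pyGetD nm 1 0 ∧ (PySem.List.pyGetD casilla_actual 1 0 + PySem.List.pyGetD mov 1 0) + PySem.List.pyGetD nm 1 0 < 8) ∧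
          PySem.List.pyGetD (PySem.List.pyGetD chess_board ((PySem.List.pyGetD casilla_actual 0 0 + PySem.List.pyGetD mov 0 0) + PySem.List.pyGetD nm 0 0) [])
            ((PySem.List.pyGetD casilla_actual 1 0 + PySem.List.pyGetD mov 1 0) + PySem.List.pyGetD nm 1 0) 0 = 0 then
        (1 : Int)
      else 0)).sum

def calcular_pesos_alt (chess_board : List (List Int)) (casilla_actual : List Int) : List (List Int) :=
  let movimientos := pvMovs
  -- pares = [(peso(m), m) for m in movimientos]
  let pares : List (Int × List Int) := movimientos.map (fun m => (pvPeso chess_board casilla_actual m, m))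
  -- one stable sort of the weight-filtered pairs, then project the moves
  ((PySem.List.sorted (pares.filter (fun pm => decide (1 ≤ pm.1 ∧ pm.1 ≤ 7))) (fun pm => pm.1)).map (fun pm => pm.2))

-- ===== PRECONDITION & SPEC =====
-- Exactly the inputs where Python A returns: casilla_actual has the two coordinates it
-- indexes, and every board cell the nested guards actually reach exists (A raises
-- IndexError otherwise; B raises on exactly the same inputs).
def Pre_calcular_pesos (chess_board : List (List Int)) (casilla_actual : List Int) : Prop :=
  2 ≤ casilla_actual.length ∧
  ∀ m ∈ pvMovs, ∀ nm ∈ pvMovs,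
    (let x := PySem.List.pyGetD casilla_actual 0 0 + PySem.List.pyGetD m 0 0
     let y := PySem.List.pyGetD casilla_actual 1 0 + PySem.List.pyGetD m 1 0
     let nx := x + PySem.List.pyGetD nm 0 0
     let ny := y + PySem.List.pyGetD nm 1 0
     (0 ≤ x ∧ x < 8 ∧ 0 ≤ y ∧ y < 8 ∧ 0 ≤ nx ∧ nx < 8 ∧ 0 ≤ ny ∧ ny < 8) →
       nx.toNat < chess_board.length ∧ ny.toNat < (chess_board.getD nx.toNat []).length)
instance (chess_board : List (List Int)) (casilla_actual : List Int) : Decidable (Pre_calcular_pesos chess_board casilla_actual) := by unfold Pre_calcular_pesos; infer_instance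

def pvWitness_calcular_pesos : List (List Int) × List Int :=
  ([[0,0,0,0,0,0,0,0],[0,0,0,0,0,0,0,0],[0,0,0,0,0,0,0,0],[0,0,0,0,0,0,0,0],
    [0,0,0,0,0,0,0,0],[0,0,0,0,0,0,0,0],[0,0,0,0,0,0,0,0],[0,0,0,0,0,0,0,0]], [0, 0])

def Spec_calcular_pesos (chess_board : List (List Int)) (casilla_actual : List Int) (out : List (List Int)) : Prop := out = calcular_pesos_alt chess_board casilla_actual
instance (chess_board : List (List Int)) (casilla_actual : List Int) (out : List (List Int)) : Decidable (Spec_calcular_pesos chess_board casilla_actual out) := by unfold Spec_calcular_pesos; infer_instance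

-- ===== CLAIM (what is proved, stated in full; the proofs are below) =====
def Claim_equal_calcular_pesos : Prop := ∀ (chess_board : List (List Int)) (casilla_actual : List Int), Dom_calcular_pesos chess_board casilla_actual → Pre_calcular_pesos chess_board casilla_actual → Spec_calcular_pesos chess_board casilla_actual (calcular_pesos chess_board casilla_actual)

-- ===== LEMMAS AND PROOFS =====

-- the weight pairs both normal forms are phrased over
def pvPares (chess_board : List (List Int)) (casilla_actual : List Int) : List (Int × List Int) :=
  pvMovs.map (fun m => (pvPeso chess_board casilla_actual m, m))

-- inserting before a prefix it is not "before" walks past the prefix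
theorem pvInsertBy_append {α : Type} (before : α → α → Bool) (x : α) (pre ys : List α)
    (h : ∀ y ∈ pre, before x y = false) :
    PySem.List.insertBy before x (pre ++ ys) = pre ++ PySem.List.insertBy before x ys := by
  induction pre with
  | nil => simp
  | cons a t ih =>
      have ha : before x a = false := h a (by simp)
      simp [PySem.List.insertBy, ha, ih (fun y hy => h y (by simp [hy]))]

-- inserting before everything puts x at the head
theorem pvInsertBy_front {α : Type} (before : α → α → Bool) (x : α) (ys : List α)
    (h : ∀ y ∈ ys, before x y = true) :
    PySem.List.insertBy before x ys = x :: ys := by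
  cases ys with
  | nil => simp [PySem.List.insertBy]
  | cons a t => simp [PySem.List.insertBy, h a (by simp)]

-- pointwise-equal bucket functions give the same concatenation
theorem pvFlatMap_congr {α β : Type} {l : List α} {f g : α → List β}
    (h : ∀ a ∈ l, f a = g a) : l.flatMap f = l.flatMap g := by
  induction l with
  | nil => rfl
  | cons a t ih =>
      simp only [List.flatMap_cons, h a (by simp), ih (fun b hb => h b (by simp [hb]))]

-- one stable insertion into a list laid out as ascending key-buckets lands at the end of x's bucket
theorem pvInsertBy_flatMap {α : Type} (key : α → Int) (x : α) :
    ∀ (ks : List Int), ks.Pairwise (· < ·) → key x ∈ ks → ∀ (xs : List α),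
    PySem.List.insertBy (fun a b => decide (key a < key b)) x
        (ks.flatMap (fun k => xs.filter (fun p => decide (key p = k)))) =
      ks.flatMap (fun k => (xs ++ [x]).filter (fun p => decide (key p = k))) := by
  intro ks
  induction ks with
  | nil => intro _ hx; exact absurd hx (by simp)
  | cons k ks' ih =>
      intro hpw hx xs
      have hlt : ∀ k' ∈ ks', k < k' := (List.pairwise_cons.mp hpw).1
      have hpw' : ks'.Pairwise (· < ·) := (List.pairwise_cons.mp hpw).2
      have hpre : ∀ y ∈ xs.filter (fun p => decide (key p = k)),
          (fun a b => decide (key a < key b)) x y = false := by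
        intro y hy
        have h1 := (List.mem_filter.mp hy).2
        rcases List.mem_cons.mp hx with h2 | h2
        · simp at h1 ⊢; omega
        · have := hlt _ h2; simp at h1 ⊢; omega
      by_cases hk : key x = k
      · -- x belongs to the first bucket: append it there
        have hrest : ∀ y ∈ ks'.flatMap (fun k' => xs.filter (fun p => decide (key p = k'))),
            (fun a b => decide (key a < key b)) x y = true := by
          intro y hy
          rcases List.mem_flatMap.mp hy with ⟨k', hk', hyk⟩
          have h1 := (List.mem_filter.mp hyk).2
          have h2 := hlt k' hk'
          simp at h1 ⊢
          omega
        have hne : ∀ k' ∈ ks', (xs ++ [x]).filter (fun p => decide (key p = k')) =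
            xs.filter (fun p => decide (key p = k')) := by
          intro k' hk'
          have : key x ≠ k' := by have := hlt k' hk'; omega
          simp [List.filter_append, this]
        have hx2 : (xs ++ [x]).filter (fun p => decide (key p = k)) =
            xs.filter (fun p => decide (key p = k)) ++ [x] := by
          simp [List.filter_append, hk]
        rw [List.flatMap_cons, pvInsertBy_append _ _ _ _ hpre, pvInsertBy_front _ _ _ hrest,
            List.flatMap_cons, hx2, pvFlatMap_congr hne]
        simp
      · -- x belongs to a later bucket: walk past the first one and recurse
        have hx' : key x ∈ ks' := by
          rcases List.mem_cons.mp hx with h | h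
          · exact absurd h hk
          · exact h
        have hx2 : (xs ++ [x]).filter (fun p => decide (key p = k)) =
            xs.filter (fun p => decide (key p = k)) := by
          simp [List.filter_append, hk]
        rw [List.flatMap_cons, pvInsertBy_append _ _ _ _ hpre, ih hpw' hx' xs,
            List.flatMap_cons, hx2]

-- a stable sort whose keys all lie in a strictly increasing ks is the bucket concatenation
theorem pvSorted_eq_flatMap {α : Type} (key : α → Int) (ks : List Int) (hks : ks.Pairwise (· < ·)) :
    ∀ (l : List α), (∀ p ∈ l, key p ∈ ks) →
    PySem.List.sorted l key = ks.flatMap (fun k => l.filter (fun p => decide (key p = k))) := by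
  intro l
  induction l using List.reverseRecOn with
  | nil => intro _; simp [PySem.List.sorted_eq_foldl_insertBy]
  | append_singleton xs x ih =>
      intro hl
      have h1 : PySem.List.sorted (xs ++ [x]) key =
          PySem.List.insertBy (fun a b => decide (key a < key b)) x (PySem.List.sorted xs key) := by
        rw [PySem.List.sorted_eq_foldl_insertBy, PySem.List.sorted_eq_foldl_insertBy, List.foldl_append]
        simp
      rw [h1, ih (fun p hp => hl p (by simp [hp])),
          pvInsertBy_flatMap key x ks hks (hl x (by simp)) xs]

-- A's per-move weight computation (condition and counting loop) computes pvPeso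
theorem pvPeso_eq (chess_board : List (List Int)) (casilla_actual : List Int) (mov : List Int) :
    (if ¬(0 ≤ PySem.List.pyGetD casilla_actual 0 0 + PySem.List.pyGetD mov 0 0 ∧ PySem.List.pyGetD casilla_actual 0 0 + PySem.List.pyGetD mov 0 0 < 8) ∨ ¬(0 ≤ PySem.List.pyGetD casilla_actual 1 0 + PySem.List.pyGetD mov 1 0 ∧ PySem.List.pyGetD casilla_actual 1 0 + PySem.List.pyGetD mov 1 0 < 8) then (0 : Int)
     else
       List.foldl (fun cont nuevo_movimiento =>
        let new_mov_x := PySem.List.pyGetD casilla_actual 0 0 + PySem.List.pyGetD mov 0 0 + PySem.List.pyGetD nuevo_movimiento 0 0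
        let new_mov_y := PySem.List.pyGetD casilla_actual 1 0 + PySem.List.pyGetD mov 1 0 + PySem.List.pyGetD nuevo_movimiento 1 0
        if (0 ≤ new_mov_x ∧ new_mov_x < 8) ∧ (0 ≤ new_mov_y ∧ new_mov_y < 8) ∧
            PySem.List.pyGetD (PySem.List.pyGetD chess_board new_mov_x []) new_mov_y 0 = 0 then
          cont + 1
        else cont) 1 pvMovs) = pvPeso chess_board casilla_actual mov := by
  unfold pvPeso
  by_cases h : (0 ≤ PySem.List.pyGetD casilla_actual 0 0 + PySem.List.pyGetD mov 0 0 ∧ PySem.List.pyGetD casilla_actual 0 0 + PySem.List.pyGetD mov 0 0 < 8) ∧ (0 ≤ PySem.List.pyGetD casilla_actual 1 0 + PySem.List.pyGetD mov 1 0 ∧ PySem.List.pyGetD casilla_actual 1 0 + PySem.List.pyGetD mov 1 0 < 8)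
  · rw [if_neg (by tauto), if_neg (by tauto), PySem.List.foldl_ite_add_one]
    have hs := PySem.List.sum_map_ite_one_zero
      (fun nm : List Int =>
        decide ((0 ≤ PySem.List.pyGetD casilla_actual 0 0 + PySem.List.pyGetD mov 0 0 + PySem.List.pyGetD nm 0 0 ∧ PySem.List.pyGetD casilla_actual 0 0 + PySem.List.pyGetD mov 0 0 + PySem.List.pyGetD nm 0 0 < 8) ∧
          (0 ≤ PySem.List.pyGetD casilla_actual 1 0 + PySem.List.pyGetD mov 1 0 + PySem.List.pyGetD nm 1 0 ∧ PySem.List.pyGetD casilla_actual 1 0 + PySem.List.pyGetD mov 1 0 + PySem.List.pyGetD nm 1 0 < 8) ∧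
          PySem.List.pyGetD (PySem.List.pyGetD chess_board (PySem.List.pyGetD casilla_actual 0 0 + PySem.List.pyGetD mov 0 0 + PySem.List.pyGetD nm 0 0) [])
            (PySem.List.pyGetD casilla_actual 1 0 + PySem.List.pyGetD mov 1 0 + PySem.List.pyGetD nm 1 0) 0 = 0)) pvMovs
    simp only [decide_eq_true_eq] at hs
    rw [hs]
  · rw [if_pos (by tauto), if_pos (by tauto)]

-- the first loop of A builds the list of the eight weights
theorem pvPesos_eq (chess_board : List (List Int)) (casilla_actual : List Int) :
    List.foldl (fun (pesos : List Int) (movimiento : List Int) =>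
      let mov_x := PySem.List.pyGetD casilla_actual 0 0 + PySem.List.pyGetD movimiento 0 0
      let mov_y := PySem.List.pyGetD casilla_actual 1 0 + PySem.List.pyGetD movimiento 1 0
      if ¬(0 ≤ mov_x ∧ mov_x < 8) ∨ ¬(0 ≤ mov_y ∧ mov_y < 8) then pesos ++ [0]
      else
        let cont : Int := List.foldl (fun cont nuevo_movimiento =>
          let new_mov_x := mov_x + PySem.List.pyGetD nuevo_movimiento 0 0
          let new_mov_y := mov_y + PySem.List.pyGetD nuevo_movimiento 1 0
          if (0 ≤ new_mov_x ∧ new_mov_x < 8) ∧ (0 ≤ new_mov_y ∧ new_mov_y < 8) ∧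
              PySem.List.pyGetD (PySem.List.pyGetD chess_board new_mov_x []) new_mov_y 0 = 0 then
            cont + 1
          else cont) 1 pvMovs
        pesos ++ [cont]) [] pvMovs = pvMovs.map (pvPeso chess_board casilla_actual) := by
  refine Eq.trans (PySem.List.foldl_congr_mem' _ _
    (fun (pesos : List Int) (movimiento : List Int) =>
      pesos ++ [pvPeso chess_board casilla_actual movimiento]) _ ?_) ?_
  · intro movimiento _ pesos
    show (if ¬(0 ≤ PySem.List.pyGetD casilla_actual 0 0 + PySem.List.pyGetD movimiento 0 0 ∧ PySem.List.pyGetD casilla_actual 0 0 + PySem.List.pyGetD movimiento 0 0 < 8) ∨ ¬(0 ≤ PySem.List.pyGetD casilla_actual 1 0 + PySem.List.pyGetD movimiento 1 0 ∧ PySem.List.pyGetD casilla_actual 1 0 + PySem.List.pyGetD movimiento 1 0 < 8) then pesos ++ [0]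
          else pesos ++ [List.foldl (fun cont nuevo_movimiento =>
        let new_mov_x := PySem.List.pyGetD casilla_actual 0 0 + PySem.List.pyGetD movimiento 0 0 + PySem.List.pyGetD nuevo_movimiento 0 0
        let new_mov_y := PySem.List.pyGetD casilla_actual 1 0 + PySem.List.pyGetD movimiento 1 0 + PySem.List.pyGetD nuevo_movimiento 1 0
        if (0 ≤ new_mov_x ∧ new_mov_x < 8) ∧ (0 ≤ new_mov_y ∧ new_mov_y < 8) ∧
            PySem.List.pyGetD (PySem.List.pyGetD chess_board new_mov_x []) new_mov_y 0 = 0 then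
          cont + 1
        else cont) 1 pvMovs]) =
        pesos ++ [pvPeso chess_board casilla_actual movimiento]
    rw [← pvPeso_eq chess_board casilla_actual movimiento]
    by_cases h : ¬(0 ≤ PySem.List.pyGetD casilla_actual 0 0 + PySem.List.pyGetD movimiento 0 0 ∧ PySem.List.pyGetD casilla_actual 0 0 + PySem.List.pyGetD movimiento 0 0 < 8) ∨ ¬(0 ≤ PySem.List.pyGetD casilla_actual 1 0 + PySem.List.pyGetD movimiento 1 0 ∧ PySem.List.pyGetD casilla_actual 1 0 + PySem.List.pyGetD movimiento 1 0 < 8)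
    · rw [if_pos h, if_pos h]
    · rw [if_neg h, if_neg h]
  · rw [PySem.List.foldl_append_singleton_eq_map]
    simp

-- the bucket scan over pesos/movimientos, for one weight k, collects that weight's pairs
theorem pvScan_eq (chess_board : List (List Int)) (casilla_actual : List Int) (k : Int) (acc : List (List Int)) :
    (PySem.List.pyRange 0 (PySem.List.len (pvMovs.map (pvPeso chess_board casilla_actual))) 1).foldl
      (fun movimientos_finales j =>
        if PySem.List.pyGetD (pvMovs.map (pvPeso chess_board casilla_actual)) j 0 = k then
          movimientos_finales ++ [PySem.List.pyGetD pvMovs j []]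
        else movimientos_finales) acc =
    acc ++ ((pvPares chess_board casilla_actual).filter (fun p => decide (p.1 = k))).map (fun p => p.2) := by
  have hfst : pvMovs.map (pvPeso chess_board casilla_actual) =
      (pvPares chess_board casilla_actual).map Prod.fst := by
    simp [pvPares, List.map_map, Function.comp_def]
  have hsnd : pvMovs = (pvPares chess_board casilla_actual).map Prod.snd := by
    simp [pvPares, List.map_map, Function.comp_def]
  have hlen : PySem.List.len (pvMovs.map (pvPeso chess_board casilla_actual)) =
      PySem.List.len (pvPares chess_board casilla_actual) := by
    simp [PySem.List.len_eq, pvPares]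
  have h1 : ∀ j : Int, PySem.List.pyGetD (pvMovs.map (pvPeso chess_board casilla_actual)) j 0 =
      (PySem.List.pyGetD (pvPares chess_board casilla_actual) j ((0 : Int), ([] : List Int))).1 := by
    intro j
    rw [hfst]
    simpa using PySem.List.pyGetD_map Prod.fst (pvPares chess_board casilla_actual) j ((0 : Int), ([] : List Int))
  have h2 : ∀ j : Int, PySem.List.pyGetD pvMovs j [] =
      (PySem.List.pyGetD (pvPares chess_board casilla_actual) j ((0 : Int), ([] : List Int))).2 := by
    intro j
    conv_lhs => rw [hsnd]
    simpa using PySem.List.pyGetD_map Prod.snd (pvPares chess_board casilla_actual) j ((0 : Int), ([] : List Int))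
  calc (PySem.List.pyRange 0 (PySem.List.len (pvMovs.map (pvPeso chess_board casilla_actual))) 1).foldl
        (fun movimientos_finales j =>
          if PySem.List.pyGetD (pvMovs.map (pvPeso chess_board casilla_actual)) j 0 = k then
            movimientos_finales ++ [PySem.List.pyGetD pvMovs j []]
          else movimientos_finales) acc
      = (PySem.List.pyRange 0 (PySem.List.len (pvPares chess_board casilla_actual)) 1).foldl
        (fun movimientos_finales j =>
          if (PySem.List.pyGetD (pvPares chess_board casilla_actual) j ((0 : Int), ([] : List Int))).1 = k then
            movimientos_finales ++ [(PySem.List.pyGetD (pvPares chess_board casilla_actual) j ((0 : Int), ([] : List Int))).2]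
          else movimientos_finales) acc := by
        rw [hlen]
        refine PySem.List.foldl_congr_mem' _ _ _ _ ?_
        intro j _ a
        rw [h1 j, h2 j]
    _ = (pvPares chess_board casilla_actual).foldl
          (fun (acc : List (List Int)) (p : Int × List Int) => if p.1 = k then acc ++ [p.2] else acc) acc :=
        PySem.List.foldl_pyRange_zero_pyGetD (pvPares chess_board casilla_actual) ((0 : Int), ([] : List Int))
          (fun (acc : List (List Int)) (p : Int × List Int) => if p.1 = k then acc ++ [p.2] else acc) acc
    _ = acc ++ ((pvPares chess_board casilla_actual).filter (fun p => decide (p.1 = k))).map (fun p => p.2) :=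
        PySem.List.foldl_append_ite (fun p : Int × List Int => p.1 = k) (fun p => p.2)
          (pvPares chess_board casilla_actual) acc

theorem pvA_normal (chess_board : List (List Int)) (casilla_actual : List Int) :
    calcular_pesos chess_board casilla_actual =
      (PySem.List.pyRange 1 8 1).flatMap (fun k =>
        ((pvPares chess_board casilla_actual).filter (fun p => decide (p.1 = k))).map (fun p => p.2)) := by
  unfold calcular_pesos
  simp only []
  rw [pvPesos_eq]
  refine Eq.trans (PySem.List.foldl_congr_mem' _ _
    (fun (acc : List (List Int)) (k : Int) =>
      acc ++ ((pvPares chess_board casilla_actual).filter (fun p => decide (p.1 = k))).map (fun p => p.2)) _ ?_) ?_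
  · intro k _ acc
    exact pvScan_eq chess_board casilla_actual k acc
  · rw [PySem.List.foldl_append_eq_flatMap]
    simp

theorem pvB_normal (chess_board : List (List Int)) (casilla_actual : List Int) :
    calcular_pesos_alt chess_board casilla_actual =
      (PySem.List.pyRange 1 8 1).flatMap (fun k =>
        ((pvPares chess_board casilla_actual).filter (fun p => decide (p.1 = k))).map (fun p => p.2)) := by
  unfold calcular_pesos_alt
  simp only []
  have hrange : PySem.List.pyRange 1 8 1 = [1, 2, 3, 4, 5, 6, 7] := by decide
  have hpares : pvMovs.map (fun m => (pvPeso chess_board casilla_actual m, m)) =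
      pvPares chess_board casilla_actual := rfl
  rw [hpares, hrange]
  have hmem : ∀ p ∈ (pvPares chess_board casilla_actual).filter (fun pm => decide (1 ≤ pm.1 ∧ pm.1 ≤ 7)),
      (fun pm : Int × List Int => pm.1) p ∈ ([1, 2, 3, 4, 5, 6, 7] : List Int) := by
    intro p hp
    have := (List.mem_filter.mp hp).2
    simp at this ⊢
    omega
  rw [pvSorted_eq_flatMap (fun pm : Int × List Int => pm.1) [1, 2, 3, 4, 5, 6, 7] (by decide)
      ((pvPares chess_board casilla_actual).filter (fun pm => decide (1 ≤ pm.1 ∧ pm.1 ≤ 7))) hmem,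
    List.map_flatMap]
  refine pvFlatMap_congr ?_
  intro k hk
  have hk17 : (1 : Int) ≤ k ∧ k ≤ 7 := by
    simp at hk
    rcases hk with h | h | h | h | h | h | h <;> omega
  congr 1
  rw [List.filter_filter]
  refine List.filter_congr ?_
  intro p _
  by_cases hpk : p.1 = k
  · simp [hpk]; omega
  · simp [hpk]

-- ===== VERDICT (by name: the statement is the Claim_ definition above) =====
theorem calcular_pesos_spec : Claim_equal_calcular_pesos := by
  intro chess_board casilla_actual _ _
  unfold Spec_calcular_pesos
  rw [pvA_normal, pvB_normal]
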